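-- pv_equiv track=rewrite | github.com/mdliss/AssessMax | backend/app/nlp/evidence_extraction.py | _build_page_map
-- ===== SOURCE A (Python) =====
-- from typing import Dict, List, Optional, Tuple
--
-- def _build_page_map(text: str, words_per_page: int = 500) -> List[int]:
--     """
--     Build a map of character positions to page numbers.
--
--     Args:
--         text: Input text
--         words_per_page: Estimated words per page
--
--     Returns:
--         List of character positions where each page starts
--     """
--     words = text.split()
--     page_boundaries = [0]
--     current_pos = 0
--     word_count = 0
--
--     for word in words:
--         current_pos = text.find(word, current_pos)
--         if current_pos == -1:
--             break
--
--         word_count += 1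
--         if word_count >= words_per_page:
--             page_boundaries.append(current_pos)
--             word_count = 0
--
--         current_pos += len(word)
--
--     return page_boundaries
-- ===== SOURCE B (Python) =====
-- def _build_page_map(text: str, words_per_page: int = 500):
--     # Single character-level scan: detect word starts directly (a non-space char
--     # entered from space/start of text) instead of tokenizing with split() and
--     # re-locating each token with find().  Each detected word start is the exact
--     # position A's find() returns, so the counter/boundary logic sees the same
--     # sequence of positions.
--     boundaries = [0]
--     count = 0
--     in_word = False
--     for i, ch in enumerate(text):
--         if ch.isspace():
--             in_word = False
--         elif not in_word:
--             in_word = True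
--             count += 1
--             if count >= words_per_page:
--                 boundaries.append(i)
--                 count = 0
--     return boundaries
-- ===== Notes on version B (the rewrite author's own statement) =====
-- stated objective: alternative
-- what changed: A tokenizes with split() and re-locates every token with find(); B never tokenizes: it runs a single character-level state machine over the text that detects word starts (non-space entered from space/start) and applies the same page counter to those positions.
import Mathlib
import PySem

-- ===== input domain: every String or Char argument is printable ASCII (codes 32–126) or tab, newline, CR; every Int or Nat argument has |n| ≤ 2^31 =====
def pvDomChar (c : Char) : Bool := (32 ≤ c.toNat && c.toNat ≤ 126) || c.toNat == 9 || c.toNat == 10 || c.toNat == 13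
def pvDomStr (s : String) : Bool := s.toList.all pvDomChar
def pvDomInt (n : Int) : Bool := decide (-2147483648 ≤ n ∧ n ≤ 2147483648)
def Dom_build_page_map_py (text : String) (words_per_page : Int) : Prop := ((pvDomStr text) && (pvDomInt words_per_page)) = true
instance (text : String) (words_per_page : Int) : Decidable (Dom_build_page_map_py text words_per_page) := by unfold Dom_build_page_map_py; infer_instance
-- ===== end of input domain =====

-- B replaces A's split()+find() token relocation by a single character-level state-machine
-- scan that detects word starts directly; objective: alternative algorithm, same result.

-- ===== PORT A =====
-- A's single loop over text.split(), carrying (page_boundaries, current_pos, word_count).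
def buildLoopA (text : String) (wpp : Int) : List String → List Int → Int → Int → List Int
  | [], bs, _, _ => bs
  | w :: ws, bs, pos, wc =>
    let p := PySem.Str.findFrom text w pos
    if p = -1 then bs
    else
      let wc' := wc + 1
      if wc' ≥ wpp then buildLoopA text wpp ws (bs ++ [p]) (p + PySem.Str.len w) 0
      else buildLoopA text wpp ws bs (p + PySem.Str.len w) wc'

def build_page_map_py (text : String) (words_per_page : Int) : List Int :=
  buildLoopA text words_per_page (PySem.Str.split₀ text) [0] 0 0

-- ===== PORT B =====
-- Source B's `for i, ch in enumerate(text)` loop, carrying (i, in_word, count, boundaries);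
-- `ch.isspace()` is PySem.Chars.isspace (Python-exact per character).
def scanB (wpp : Int) : List Char → Int → Bool → Int → List Int → List Int
  | [], _, _, _, bs => bs
  | ch :: rest, i, inWord, count, bs =>
    if PySem.Chars.isspace ch then scanB wpp rest (i + 1) false count bs
    else if !inWord then
      if count + 1 ≥ wpp then scanB wpp rest (i + 1) true 0 (bs ++ [i])
      else scanB wpp rest (i + 1) true (count + 1) bs
    else scanB wpp rest (i + 1) inWord count bs

def build_page_map_py_alt (text : String) (words_per_page : Int) : List Int :=
  scanB words_per_page text.toList 0 false 0 [0]

-- ===== PRECONDITION & SPEC =====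
def Spec_build_page_map_py (text : String) (words_per_page : Int) (out : List Int) : Prop := out = build_page_map_py_alt text words_per_page
instance (text : String) (words_per_page : Int) (out : List Int) : Decidable (Spec_build_page_map_py text words_per_page out) := by unfold Spec_build_page_map_py; infer_instance

-- ===== CLAIM (what is proved, stated in full; the proofs are below) =====
def Claim_equal_build_page_map_py : Prop := ∀ (text : String) (words_per_page : Int), Dom_build_page_map_py text words_per_page → Spec_build_page_map_py text words_per_page (build_page_map_py text words_per_page)

-- ===== LEMMAS AND PROOFS =====

-- A's loop restated on List Char (proof-side mirror of buildLoopA).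
def loopA (s : List Char) (wpp : Int) : List (List Char) → List Int → Int → Int → List Int
  | [], bs, _, _ => bs
  | w :: ws, bs, pos, wc =>
    let p := PySem.Chars.findFrom s w pos
    if p = -1 then bs
    else
      if wc + 1 ≥ wpp then loopA s wpp ws (bs ++ [p]) (p + w.length) 0
      else loopA s wpp ws bs (p + w.length) (wc + 1)

theorem buildLoopA_eq_loopA (text : String) (wpp : Int) :
    ∀ (ws : List String) (bs : List Int) (pos wc : Int),
      buildLoopA text wpp ws bs pos wc
        = loopA text.toList wpp (ws.map String.toList) bs pos wc := by
  intro ws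
  induction ws with
  | nil => intro bs pos wc; rfl
  | cons w ws ih =>
    intro bs pos wc
    simp only [buildLoopA, loopA, List.map_cons, PySem.Str.findFrom_eq, PySem.Str.len_eq]
    split_ifs <;> simp [ih]

-- split₀.go: the accumulator prepends (reversed).
theorem go_acc : ∀ (cs cur : List Char) (acc : List (List Char)),
    PySem.Chars.split₀.go cs cur acc = acc.reverse ++ PySem.Chars.split₀.go cs cur [] := by
  intro cs
  induction cs with
  | nil =>
    intro cur acc
    simp only [PySem.Chars.split₀.go]
    by_cases h : cur.isEmpty <;> simp [h]
  | cons c cs ih =>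
    intro cur acc
    simp only [PySem.Chars.split₀.go]
    by_cases hs : PySem.Chars.isspace c
    · by_cases h : cur.isEmpty
      · simp only [hs, h, if_true]
        rw [ih [] acc]
      · simp only [hs, h, if_true, ite_false]
        rw [ih [] (cur.reverse :: acc), ih [] [cur.reverse]]
        simp
    · simp only [hs, ite_false]
      exact ih _ acc

theorem split0_nil : PySem.Chars.split₀ [] = [] := rfl

theorem split0_cons_space (c : Char) (cs : List Char) (h : PySem.Chars.isspace c = true) :
    PySem.Chars.split₀ (c :: cs) = PySem.Chars.split₀ cs := by
  simp [PySem.Chars.split₀, PySem.Chars.split₀.go, h]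

-- a nonempty current word is flushed as (cur.reverse ++ longest nonspace run), then recurse
theorem go_word : ∀ (cs cur : List Char), cur ≠ [] →
    PySem.Chars.split₀.go cs cur []
      = (cur.reverse ++ cs.takeWhile (fun d => !PySem.Chars.isspace d))
          :: PySem.Chars.split₀ (cs.dropWhile (fun d => !PySem.Chars.isspace d)) := by
  intro cs
  induction cs with
  | nil =>
    intro cur hc
    simp [PySem.Chars.split₀.go, List.isEmpty_iff, hc, split0_nil]
  | cons d cs ih =>
    intro cur hc
    by_cases hs : PySem.Chars.isspace d
    · have h1 : PySem.Chars.split₀.go (d :: cs) cur []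
          = PySem.Chars.split₀.go cs [] [cur.reverse] := by
        simp [PySem.Chars.split₀.go, hs, List.isEmpty_iff, hc]
      have h2 : PySem.Chars.split₀.go cs [] [] = PySem.Chars.split₀ cs := rfl
      rw [h1, go_acc cs [] [cur.reverse], h2]
      simp only [List.takeWhile_cons, List.dropWhile_cons, hs, Bool.not_true, ite_false,
        Bool.false_eq_true]
      rw [split0_cons_space d cs hs]
      simp
    · simp only [PySem.Chars.split₀.go, hs, ite_false]
      rw [ih (d :: cur) (by simp)]
      simp [hs]

theorem split0_cons_word (c : Char) (cs : List Char) (h : PySem.Chars.isspace c = false) :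
    PySem.Chars.split₀ (c :: cs)
      = (c :: cs.takeWhile (fun d => !PySem.Chars.isspace d))
          :: PySem.Chars.split₀ (cs.dropWhile (fun d => !PySem.Chars.isspace d)) := by
  have : PySem.Chars.split₀ (c :: cs) = PySem.Chars.split₀.go cs [c] [] := by
    simp [PySem.Chars.split₀, PySem.Chars.split₀.go, h]
  rw [this, go_word cs [c] (by simp)]
  simp

-- every first token produced by split₀ starts with a non-space character
theorem split0_head_nonspace : ∀ (cs : List Char) (w : List Char) (tks : List (List Char)),
    PySem.Chars.split₀ cs = w :: tks → ∃ d t, w = d :: t ∧ PySem.Chars.isspace d = false := by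
  intro cs
  induction cs with
  | nil => intro w tks h; rw [split0_nil] at h; cases h
  | cons c cs ih =>
    intro w tks h
    by_cases hs : PySem.Chars.isspace c
    · rw [split0_cons_space c cs hs] at h; exact ih w tks h
    · rw [split0_cons_word c cs (by simpa using hs)] at h
      exact ⟨c, cs.takeWhile (fun d => !PySem.Chars.isspace d), by injection h with h1 _; exact h1.symm, by simpa using hs⟩

-- find of a prefix is 0
theorem find_of_prefix (l w : List Char) (h : w <+: l) : PySem.Chars.find l w = 0 := by
  have hin : w <:+: l := h.isInfix
  have h0 : 0 ≤ PySem.Chars.find l w := (PySem.Chars.find_nonneg_iff l w).2 hin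
  obtain ⟨_, hmin⟩ := PySem.Chars.find_spec h0
  by_contra hne
  have hpos : 0 < (PySem.Chars.find l w).toNat := by omega
  have := hmin 0 hpos
  simp at this
  exact this h

-- first occurrence shifts by one over a mismatching head character
theorem find_cons_of_head_ne (c d : Char) (l t : List Char) (hne : c ≠ d) :
    PySem.Chars.find (c :: l) (d :: t)
      = if PySem.Chars.find l (d :: t) = -1 then -1 else 1 + PySem.Chars.find l (d :: t) := by
  by_cases hm : PySem.Chars.find l (d :: t) = -1
  · simp only [hm, ite_true]
    rw [PySem.Chars.find_eq_neg_one_iff]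
    intro hin
    have hIn : PySem.Chars.isIn (d :: t) (c :: l) = true := (PySem.Chars.isIn_iff_infix _ _).2 hin
    obtain ⟨j, hj⟩ := (PySem.Chars.exists_prefix_drop_iff_isIn (d :: t) (c :: l)).2 hIn
    cases j with
    | zero =>
      simp only [List.drop_zero] at hj
      exact hne ((List.cons_prefix_cons.1 hj).1.symm)
    | succ j =>
      rw [List.drop_succ_cons] at hj
      have : PySem.Chars.isIn (d :: t) l = true :=
        (PySem.Chars.exists_prefix_drop_iff_isIn (d :: t) l).1 ⟨j, hj⟩
      have := (PySem.Chars.isIn_iff_infix _ _).1 this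
      rw [PySem.Chars.find_eq_neg_one_iff] at hm
      exact hm this
  · have h0 : 0 ≤ PySem.Chars.find l (d :: t) := by
      have := PySem.Chars.neg_one_le_find l (d :: t); omega
    obtain ⟨hocc, hmin⟩ := PySem.Chars.find_spec h0
    set m := (PySem.Chars.find l (d :: t)).toNat with hmdef
    have hoccC : (d :: t) <+: List.drop (m + 1) (c :: l) := by
      rw [List.drop_succ_cons]; exact hocc
    have hinC : (d :: t) <:+: (c :: l) := by
      have : PySem.Chars.isIn (d :: t) (c :: l) = true :=
        (PySem.Chars.exists_prefix_drop_iff_isIn (d :: t) (c :: l)).1 ⟨m + 1, hoccC⟩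
      exact (PySem.Chars.isIn_iff_infix _ _).1 this
    have hF0 : 0 ≤ PySem.Chars.find (c :: l) (d :: t) :=
      (PySem.Chars.find_nonneg_iff _ _).2 hinC
    obtain ⟨Focc, Fmin⟩ := PySem.Chars.find_spec hF0
    set F := (PySem.Chars.find (c :: l) (d :: t)).toNat with hFdef
    have hFne : F ≠ 0 := by
      intro h
      rw [h, List.drop_zero] at Focc
      exact hne ((List.cons_prefix_cons.1 Focc).1.symm)
    have hdropF : List.drop F (c :: l) = List.drop (F - 1) l := by
      have hF' : F - 1 + 1 = F := by omega
      rw [← hF', List.drop_succ_cons]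
      simp
    rw [hdropF] at Focc
    have h1 : m ≤ F - 1 := by
      by_contra hlt
      exact hmin (F - 1) (by omega) Focc
    have h2 : F ≤ m + 1 := by
      by_contra hlt
      exact Fmin (m + 1) (by omega) hoccC
    rw [if_neg hm]
    omega

-- the two findFrom starting points on either side of a leading space agree
theorem findFrom_space_shift (s : List Char) (k : Nat) (c : Char) (cs' : List Char)
    (hk : k ≤ s.length) (hdrop : s.drop k = c :: cs') (hc : PySem.Chars.isspace c = true)
    (d : Char) (t : List Char) (hd : PySem.Chars.isspace d = false) :
    PySem.Chars.findFrom s (d :: t) (k : Int) = PySem.Chars.findFrom s (d :: t) ((k + 1 : Nat) : Int) := by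
  have hk1 : k + 1 ≤ s.length := by
    have := congrArg List.length hdrop
    simp at this; omega
  have hdrop1 : s.drop (k + 1) = cs' := by
    have : List.drop 1 (List.drop k s) = List.drop (k + 1) s := by
      rw [List.drop_drop]
    rw [← this, hdrop]; rfl
  rw [PySem.Chars.findFrom_natCast s (d :: t) k hk, PySem.Chars.findFrom_natCast s (d :: t) (k + 1) hk1]
  rw [hdrop, hdrop1]
  have hne : c ≠ d := by intro h; rw [h] at hc; rw [hc] at hd; cases hd
  rw [find_cons_of_head_ne c d cs' t hne]
  by_cases h : PySem.Chars.find cs' (d :: t) = -1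
  · simp [h]
  · have := PySem.Chars.neg_one_le_find cs' (d :: t)
    simp only [h, ite_false]
    split_ifs with h2
    · omega
    · push_cast; ring

-- loopA only reads pos through the first token's findFrom
theorem loopA_pos_congr (s : List Char) (wpp : Int) (tks : List (List Char))
    (bs : List Int) (pos pos' wc : Int)
    (h : ∀ w ws, tks = w :: ws → PySem.Chars.findFrom s w pos = PySem.Chars.findFrom s w pos') :
    loopA s wpp tks bs pos wc = loopA s wpp tks bs pos' wc := by
  cases tks with
  | nil => rfl
  | cons w ws => simp only [loopA, h w ws rfl]

-- skipping a run of non-space characters inside a word only advances B's index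
theorem scanB_word (wpp : Int) : ∀ (t : List Char), (∀ d ∈ t, PySem.Chars.isspace d = false) →
    ∀ (r : List Char) (i cnt : Int) (bs : List Int),
      scanB wpp (t ++ r) i true cnt bs = scanB wpp r (i + t.length) true cnt bs := by
  intro t
  induction t with
  | nil => intro _ r i cnt bs; simp
  | cons d t ih =>
    intro hall r i cnt bs
    have hd := hall d (by simp)
    simp only [List.cons_append, scanB, hd, Bool.not_true, ite_false, Bool.false_eq_true]
    rw [ih (fun e he => hall e (by simp [he])) r (i + 1) cnt bs]
    congr 1
    simp only [List.length_cons]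
    push_cast
    ring

-- when the next character is a space (or the text ends), in_word's value is irrelevant
theorem scanB_inword_irrel (wpp : Int) (r : List Char)
    (h : ∀ c, r.head? = some c → PySem.Chars.isspace c = true)
    (i cnt : Int) (bs : List Int) :
    scanB wpp r i true cnt bs = scanB wpp r i false cnt bs := by
  cases r with
  | nil => rfl
  | cons c cs =>
    have hc := h c rfl
    simp [scanB, hc]

-- MAIN: A's token loop from position k equals B's character scan of the suffix from k
theorem main_loop_eq (s : List Char) (wpp : Int) : ∀ (n k : Nat), k ≤ s.length → s.length - k ≤ n →
    ∀ (bs : List Int) (wc : Int),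
      loopA s wpp (PySem.Chars.split₀ (s.drop k)) bs (k : Int) wc
        = scanB wpp (s.drop k) (k : Int) false wc bs := by
  intro n
  induction n with
  | zero =>
    intro k hk hn bs wc
    have : s.drop k = [] := List.drop_eq_nil_of_le (by omega)
    rw [this, split0_nil]
    rfl
  | succ n ih =>
    intro k hk hn bs wc
    cases hdrop : s.drop k with
    | nil =>
      rw [split0_nil]; rfl
    | cons c cs' =>
      have hklt : k < s.length := by
        by_contra h
        rw [List.drop_eq_nil_of_le (by omega)] at hdrop; cases hdrop
      have hdrop1 : s.drop (k + 1) = cs' := by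
        have : List.drop 1 (List.drop k s) = List.drop (k + 1) s := by rw [List.drop_drop]
        rw [← this, hdrop]; rfl
      by_cases hc : PySem.Chars.isspace c
      · -- leading whitespace: A skips it via split₀, B steps over it
        rw [split0_cons_space c cs' hc]
        have hshift : loopA s wpp (PySem.Chars.split₀ cs') bs (k : Int) wc
            = loopA s wpp (PySem.Chars.split₀ cs') bs ((k + 1 : Nat) : Int) wc := by
          apply loopA_pos_congr
          intro w ws hw
          obtain ⟨d, t, rfl, hd⟩ := split0_head_nonspace cs' w ws hw
          exact findFrom_space_shift s k c cs' hk hdrop hc d t hd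
        rw [hshift, ← hdrop1]
        rw [ih (k + 1) (by omega) (by omega) bs wc]
        rw [hdrop1]
        simp only [scanB, hc, if_true, ite_true]
        congr 1
      · -- a word starts at k: A's find lands exactly at k
        have hq : (fun d => !PySem.Chars.isspace d) c = true := by simp [hc]
        rw [split0_cons_word c cs' (by simpa using hc)]
        set q : Char → Bool := fun d => !PySem.Chars.isspace d with hqdef
        set w : List Char := c :: cs'.takeWhile q with hwdef
        set r : List Char := cs'.dropWhile q with hrdef
        have hwr : w ++ r = s.drop k := by
          rw [hdrop, hwdef, hrdef, List.cons_append, List.takeWhile_append_dropWhile]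
        have hpre : w <+: s.drop k := ⟨r, hwr⟩
        have hfind : PySem.Chars.find (s.drop k) w = 0 := find_of_prefix _ _ hpre
        have hff : PySem.Chars.findFrom s w (k : Int) = (k : Int) := by
          rw [PySem.Chars.findFrom_natCast s w k hk, hfind]
          simp
        have hlen : k + w.length ≤ s.length := by
          have := congrArg List.length hwr
          simp [List.length_drop] at this
          omega
        have hdropw : s.drop (k + w.length) = r := by
          have h1 : List.drop (k + w.length) s = List.drop w.length (List.drop k s) :=
            List.drop_drop.symm
          rw [h1, hdrop, show (c :: cs' : List Char) = w ++ r from (hwr.trans hdrop).symm]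
          exact List.drop_left
        have hwpos : 1 ≤ w.length := by rw [hwdef]; simp
        have hallt : ∀ d ∈ cs'.takeWhile q, PySem.Chars.isspace d = false := by
          intro d hd
          have := List.mem_takeWhile_imp hd
          rw [hqdef] at this; simpa using this
        have hrhead : ∀ ch, r.head? = some ch → PySem.Chars.isspace ch = true := by
          intro ch hch
          cases hr : List.dropWhile q cs' with
          | nil => rw [hrdef, hr] at hch; cases hch
          | cons a as =>
            have hqa := List.head?_dropWhile_not q cs'
            rw [hr] at hqa
            simp only [List.head?_cons] at hqa
            have hcha : ch = a := by
              rw [hrdef, hr] at hch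
              simpa using hch.symm
            rw [hcha]
            rw [hqdef] at hqa
            simpa using hqa
        -- unfold both sides one step
        have hcast : (k : Int) + (w.length : Int) = ((k + w.length : Nat) : Int) := by push_cast; ring
        have hIH := ih (k + w.length) hlen (by omega)
        simp only [loopA, hff]
        rw [if_neg (by omega)]
        -- B side: step over c, then the rest of the word, then flip in_word off
        have hBstep : ∀ (cnt' : Int) (bs' : List Int),
            scanB wpp (cs'.takeWhile q ++ r) ((k : Int) + 1) true cnt' bs'
              = scanB wpp r ((k + w.length : Nat) : Int) false cnt' bs' := by
          intro cnt' bs'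
          rw [scanB_word wpp _ hallt r _ cnt' bs']
          rw [scanB_inword_irrel wpp r hrhead]
          congr 1
          rw [hwdef]; push_cast; simp; ring
        have hcs' : cs' = cs'.takeWhile q ++ r := by
          rw [hrdef, List.takeWhile_append_dropWhile]
        by_cases hwc : wc + 1 ≥ wpp
        · rw [if_pos hwc, hcast, ← hdropw, hIH (bs ++ [(k : Int)]) 0, hdropw]
          simp only [scanB, hc, if_false, ite_false, Bool.not_false, if_pos hwc, Bool.false_eq_true,
            Bool.not_true, ite_true, if_true]
          rw [hcs', hBstep 0 (bs ++ [(k : Int)])]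
        · rw [if_neg hwc, hcast, ← hdropw, hIH bs (wc + 1), hdropw]
          simp only [scanB, hc, if_false, ite_false, Bool.not_false, if_neg hwc, Bool.false_eq_true,
            Bool.not_true, ite_true, if_true]
          rw [hcs', hBstep (wc + 1) bs]

-- ===== VERDICT (by name: the statement is the Claim_ definition above) =====
theorem build_page_map_py_spec : Claim_equal_build_page_map_py := by
  intro text wpp _
  unfold Spec_build_page_map_py build_page_map_py build_page_map_py_alt
  rw [buildLoopA_eq_loopA text wpp (PySem.Str.split₀ text) [0] 0 0,
    PySem.Str.split₀_map_toList]
  have := main_loop_eq text.toList wpp text.toList.length 0 (by omega) (by omega) [0] 0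
  simpa using this
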